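-- pv_equiv track=rewrite | github.com/nealholt/wild-black-yonder | code/menus.py | splitTooLongWord
-- ===== SOURCE A (Python) =====
-- def splitTooLongWord(word_to_split='', length_limit=20):
-- 	'''If word_to_split is longer than length_limit, split it into two
-- 	words of roughly equal size and return them. '''
-- 	word_length = len(word_to_split)
-- 	if word_length > length_limit:
-- 		#Find the blank space closest to the middle of the word
-- 		mid = word_length/2
-- 		min_dist = word_length
-- 		space_index = -1
-- 		for i in range(word_length):
-- 			if word_to_split[i] == ' ':
-- 				dist = abs(i-mid)
-- 				if dist <= min_dist:
-- 					min_dist = dist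
-- 					space_index = i
-- 		return (word_to_split[:space_index], word_to_split[space_index:])
-- 	return (word_to_split, '')
-- ===== SOURCE B (Python) =====
-- def splitTooLongWord(word_to_split='', length_limit=20):
--     '''If word_to_split is longer than length_limit, split it into two
--     words of roughly equal size and return them.'''
--     n = len(word_to_split)
--     if n <= length_limit:
--         return (word_to_split, '')
--     # Walk outward from the middle with two pointers, right side first:
--     # the first space met is the one nearest the middle (later index on ties).
--     r, l = (n + 1) // 2, n // 2
--     while r < n or l >= 0:
--         if r < n and word_to_split[r] == ' ':
--             return (word_to_split[:r], word_to_split[r:])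
--         if 0 <= l < n and word_to_split[l] == ' ':
--             return (word_to_split[:l], word_to_split[l:])
--         r += 1
--         l -= 1
--     # no space anywhere: same -1 fallback slices as the original
--     return (word_to_split[:-1], word_to_split[-1:])
-- ===== Notes on version B (the rewrite author's own statement) =====
-- stated objective: alternative
-- what changed: Replaces A's full left-to-right scan with a running minimum by a two-pointer walk outward from the middle of the string (right pointer checked first, which reproduces A's last-equidistant-wins <= tie-break) that returns at the first space found, with the same -1 fallback slices when there is no space.
import Mathlib
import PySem

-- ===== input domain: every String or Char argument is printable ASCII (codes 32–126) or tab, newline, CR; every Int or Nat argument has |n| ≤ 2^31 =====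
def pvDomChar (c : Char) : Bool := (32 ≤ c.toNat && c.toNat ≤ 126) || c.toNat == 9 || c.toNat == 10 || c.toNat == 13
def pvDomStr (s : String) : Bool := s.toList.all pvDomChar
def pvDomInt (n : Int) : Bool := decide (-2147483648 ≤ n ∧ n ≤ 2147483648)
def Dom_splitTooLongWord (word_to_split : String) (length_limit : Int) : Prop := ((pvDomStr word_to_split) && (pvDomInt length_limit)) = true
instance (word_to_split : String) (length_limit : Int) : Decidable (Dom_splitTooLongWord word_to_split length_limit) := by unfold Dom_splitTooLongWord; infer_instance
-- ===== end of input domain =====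

-- B replaces A's full left-to-right scan with a two-pointer walk outward from the middle
-- (right side first, so the later index wins ties) that stops at the first space; objective: alternative.

-- ===== PORT A =====
-- A's `mid = word_length/2` is a Python float and all distances are half-integers, so the
-- port compares the DOUBLED distances exactly: 2*abs(i - n/2) = |2*i - n|, 2*min_dist₀ = 2*n.
def splitTooLongWord (word_to_split : String) (length_limit : Int) : String × String :=
  let cs := word_to_split.toList
  let n : Int := PySem.List.len cs
  if n > length_limit then
    let st := (PySem.List.pyRange 0 n 1).foldl
      (fun (s : Int × Int) i =>
        if PySem.List.pyGetD cs i 'x' = ' ' then   -- word_to_split[i] == ' ' (i always in range)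
          let dist := |2 * i - n|
          if dist ≤ s.1 then (dist, i) else s
        else s) (2 * n, -1)
    (String.ofList (PySem.List.slice cs none (some st.2)),
     String.ofList (PySem.List.slice cs (some st.2) none))
  else (word_to_split, "")

-- ===== PORT B =====
-- B's `while r < n or l >= 0` loop; the fuel `n.toNat + 1` strictly bounds the
-- iteration count (each step does r+1, l-1 and the loop stops once r ≥ n and l < 0).
def sttwScan (cs : List Char) (n : Int) : Nat → Int → Int → Option Int
  | 0, _, _ => none
  | fuel + 1, r, l =>
    if r < n ∨ 0 ≤ l then
      if r < n ∧ PySem.List.pyGetD cs r 'x' = ' ' then some r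
      else if 0 ≤ l ∧ l < n ∧ PySem.List.pyGetD cs l 'x' = ' ' then some l
      else sttwScan cs n fuel (r + 1) (l - 1)
    else none

def splitTooLongWord_alt (word_to_split : String) (length_limit : Int) : String × String :=
  let cs := word_to_split.toList
  let n : Int := PySem.List.len cs
  if n ≤ length_limit then (word_to_split, "")
  else
    match sttwScan cs n (n.toNat + 1) (PySem.Int.floordiv (n + 1) 2) (PySem.Int.floordiv n 2) with
    | some i =>
        (String.ofList (PySem.List.slice cs none (some i)),
         String.ofList (PySem.List.slice cs (some i) none))
    | none =>   -- no space anywhere: word[:-1], word[-1:]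
        (String.ofList (PySem.List.slice cs none (some (-1))),
         String.ofList (PySem.List.slice cs (some (-1)) none))

-- ===== PRECONDITION & SPEC =====
def Spec_splitTooLongWord (word_to_split : String) (length_limit : Int) (out : String × String) : Prop := out = splitTooLongWord_alt word_to_split length_limit
instance (word_to_split : String) (length_limit : Int) (out : String × String) : Decidable (Spec_splitTooLongWord word_to_split length_limit out) := by unfold Spec_splitTooLongWord; infer_instance

-- ===== CLAIM (what is proved, stated in full; the proofs are below) =====
def Claim_equal_splitTooLongWord : Prop := ∀ (word_to_split : String) (length_limit : Int), Dom_splitTooLongWord word_to_split length_limit → Spec_splitTooLongWord word_to_split length_limit (splitTooLongWord word_to_split length_limit)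

-- ===== LEMMAS AND PROOFS =====

-- "s is the space index A selects": a space, and every space j is strictly farther
-- from the middle or equally far with j ≤ s (last equidistant space wins).
def sttwChosen (cs : List Char) (n s : Int) : Prop :=
  (0 ≤ s ∧ s < n ∧ PySem.List.pyGetD cs s 'x' = ' ') ∧
  ∀ j, 0 ≤ j → j < n → PySem.List.pyGetD cs j 'x' = ' ' →
    |2 * s - n| < |2 * j - n| ∨ (|2 * j - n| = |2 * s - n| ∧ j ≤ s)

theorem sttwChosen_unique {cs : List Char} {n s t : Int}
    (hs : sttwChosen cs n s) (ht : sttwChosen cs n t) : s = t := by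
  have h1 := hs.2 t ht.1.1 ht.1.2.1 ht.1.2.2
  have h2 := ht.2 s hs.1.1 hs.1.2.1 hs.1.2.2
  simp only [Int.abs_eq_natAbs] at h1 h2
  omega

-- A's running-minimum fold over a strictly increasing list of space indices
-- ends at the chosen index.
theorem sttw_fold_char (n : Int) : ∀ (t : List Int) (m : Int), t.Pairwise (· < ·) → (∀ x ∈ t, m < x) →
    ∃ M, t.foldl (fun (s : Int × Int) i => if |2 * i - n| ≤ s.1 then (|2 * i - n|, i) else s) (|2 * m - n|, m)
        = (|2 * M - n|, M)
      ∧ M ∈ m :: t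
      ∧ ∀ j ∈ m :: t, |2 * M - n| < |2 * j - n| ∨ (|2 * j - n| = |2 * M - n| ∧ j ≤ M) := by
  intro t
  induction t with
  | nil =>
    intro m _ _
    exact ⟨m, rfl, by simp, by intro j hj; simp at hj; subst hj; right; omega⟩
  | cons x t ih =>
    intro m hp hlt
    have hmx : m < x := hlt x (by simp)
    have hxlt := (List.pairwise_cons.mp hp).1
    have hp' := (List.pairwise_cons.mp hp).2
    simp only [List.foldl_cons]
    by_cases h : |2 * x - n| ≤ |2 * m - n|
    · rw [if_pos h]
      obtain ⟨M, h1, h2, h3⟩ := ih x hp' hxlt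
      refine ⟨M, h1, List.mem_cons.mpr (Or.inr h2), ?_⟩
      intro j hj
      rcases List.mem_cons.mp hj with hj | hj
      · have hx := h3 x (List.mem_cons.mpr (Or.inl rfl))
        have hxM : x ≤ M := by
          rcases List.mem_cons.mp h2 with h' | h'
          · omega
          · exact le_of_lt (hxlt M h')
        rw [hj]
        simp only [Int.abs_eq_natAbs] at hx h ⊢
        omega
      · exact h3 j hj
    · rw [if_neg h]
      obtain ⟨M, h1, h2, h3⟩ := ih m hp' (fun y hy => lt_trans hmx (hxlt y hy))
      refine ⟨M, h1, ?_, ?_⟩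
      · rcases List.mem_cons.mp h2 with h' | h'
        · exact List.mem_cons.mpr (Or.inl h')
        · exact List.mem_cons.mpr (Or.inr (List.mem_cons.mpr (Or.inr h')))
      · intro j hj
        rcases List.mem_cons.mp hj with hj | hj
        · rw [hj]; exact h3 m (List.mem_cons.mpr (Or.inl rfl))
        · rcases List.mem_cons.mp hj with hj | hj
          · have hm := h3 m (List.mem_cons.mpr (Or.inl rfl))
            rw [hj]
            simp only [Int.abs_eq_natAbs] at hm h ⊢
            omega
          · exact h3 j (List.mem_cons.mpr (Or.inr hj))

-- B's outward two-pointer scan: under the loop invariant (r + l = n, middle gap (l, r)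
-- space-free, enough fuel) it returns `none` iff there is no space and the chosen index otherwise.
theorem sttw_scan_correct (cs : List Char) (n : Int) :
    ∀ (fuel : Nat) (r l : Int), r + l = n → n ≤ 2 * r →
    l + 1 ≤ (fuel : Int) → n - r ≤ (fuel : Int) →
    (∀ j, 0 ≤ j → j < n → PySem.List.pyGetD cs j 'x' = ' ' → j ≤ l ∨ r ≤ j) →
    ((∀ j, 0 ≤ j → j < n → PySem.List.pyGetD cs j 'x' ≠ ' ') → sttwScan cs n fuel r l = none)
    ∧ (∀ s, sttwChosen cs n s → sttwScan cs n fuel r l = some s) := by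
  intro fuel
  induction fuel with
  | zero =>
    intro r l hsum hmid hf1 hf2 hgap
    refine ⟨fun _ => rfl, ?_⟩
    intro s hs
    exfalso
    rcases hgap s hs.1.1 hs.1.2.1 hs.1.2.2 with h | h
    · have := hs.1.1; omega
    · have := hs.1.2.1; omega
  | succ fuel ih =>
    intro r l hsum hmid hf1 hf2 hgap
    by_cases hg : r < n ∨ 0 ≤ l
    · by_cases h1 : r < n ∧ PySem.List.pyGetD cs r 'x' = ' '
      · have hres : sttwScan cs n (fuel + 1) r l = some r := by
          simp only [sttwScan]; rw [if_pos hg, if_pos h1]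
        have hch : sttwChosen cs n r := by
          refine ⟨⟨by omega, h1.1, h1.2⟩, ?_⟩
          intro j hj0 hjn hjsp
          rcases hgap j hj0 hjn hjsp with h | h
          · simp only [Int.abs_eq_natAbs]; omega
          · simp only [Int.abs_eq_natAbs]; omega
        refine ⟨fun hno => absurd h1.2 (hno r (by omega) h1.1), ?_⟩
        intro s hs
        rw [hres, sttwChosen_unique hch hs]
      · by_cases h2 : 0 ≤ l ∧ l < n ∧ PySem.List.pyGetD cs l 'x' = ' '
        · have hres : sttwScan cs n (fuel + 1) r l = some l := by
            simp only [sttwScan]; rw [if_pos hg, if_neg h1, if_pos h2]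
          have hch : sttwChosen cs n l := by
            refine ⟨⟨h2.1, h2.2.1, h2.2.2⟩, ?_⟩
            intro j hj0 hjn hjsp
            rcases hgap j hj0 hjn hjsp with h | h
            · simp only [Int.abs_eq_natAbs]; omega
            · have hjr : r < j := by
                rcases eq_or_lt_of_le h with h' | h'
                · exfalso; exact h1 ⟨by omega, by rwa [h']⟩
                · exact h'
              simp only [Int.abs_eq_natAbs]; omega
          refine ⟨fun hno => absurd h2.2.2 (hno l h2.1 h2.2.1), ?_⟩
          intro s hs
          rw [hres, sttwChosen_unique hch hs]
        · have hres : sttwScan cs n (fuel + 1) r l = sttwScan cs n fuel (r + 1) (l - 1) := by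
            simp only [sttwScan]; rw [if_pos hg, if_neg h1, if_neg h2]
          have hgap' : ∀ j, 0 ≤ j → j < n → PySem.List.pyGetD cs j 'x' = ' ' → j ≤ l - 1 ∨ r + 1 ≤ j := by
            intro j hj0 hjn hjsp
            rcases hgap j hj0 hjn hjsp with h | h
            · left
              rcases eq_or_lt_of_le h with h' | h'
              · exfalso; exact h2 ⟨by omega, by omega, by rwa [← h']⟩
              · omega
            · right
              rcases eq_or_lt_of_le h with h' | h'
              · exfalso; exact h1 ⟨by omega, by rw [h']; exact hjsp⟩
              · omega
          rw [hres]
          exact ih (r + 1) (l - 1) (by omega) (by omega) (by omega) (by omega) hgap'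
    · have hres : sttwScan cs n (fuel + 1) r l = none := by
        simp only [sttwScan]; rw [if_neg hg]
      refine ⟨fun _ => hres, ?_⟩
      intro s hs
      exfalso
      rcases hgap s hs.1.1 hs.1.2.1 hs.1.2.2 with h | h
      · have h1 := hs.1.1; omega
      · have h1 := hs.1.2.1; omega

-- ===== VERDICT (by name: the statement is the Claim_ definition above) =====
theorem splitTooLongWord_spec : Claim_equal_splitTooLongWord := by
  intro w L _
  unfold Spec_splitTooLongWord splitTooLongWord splitTooLongWord_alt
  simp only [PySem.List.len_eq]
  set cs := w.toList with hcs
  set n : Int := (cs.length : Int) with hn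
  have hn0 : 0 ≤ n := by positivity
  by_cases hgt : n > L
  · rw [if_pos hgt, if_neg (by omega)]
    -- A's guarded fold = fold over the filtered list of space indices
    have hfold := PySem.List.foldl_ite_eq_foldl_filter
      (p := fun i => PySem.List.pyGetD cs i 'x' = ' ')
      (f := fun (s : Int × Int) i => if |2 * i - n| ≤ s.1 then (|2 * i - n|, i) else s)
      (l := PySem.List.pyRange 0 n 1) (init := ((2 * n : Int), (-1 : Int)))
    set F := (PySem.List.pyRange 0 n 1).filter (fun i => decide (PySem.List.pyGetD cs i 'x' = ' ')) with hF
    have hmemF : ∀ j : Int, j ∈ F ↔ (0 ≤ j ∧ j < n ∧ PySem.List.pyGetD cs j 'x' = ' ') := by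
      intro j
      rw [hF, List.mem_filter, PySem.List.mem_pyRange_one]
      simp only [decide_eq_true_eq]
      tauto
    -- B's scan initial state satisfies the invariant
    have hr0 : PySem.Int.floordiv (n + 1) 2 = (n + 1) / 2 := PySem.Int.floordiv_eq_ediv_of_pos (by omega)
    have hl0 : PySem.Int.floordiv n 2 = n / 2 := PySem.Int.floordiv_eq_ediv_of_pos (by omega)
    have hscan := sttw_scan_correct cs n (n.toNat + 1)
      (PySem.Int.floordiv (n + 1) 2) (PySem.Int.floordiv n 2)
      (by rw [hr0, hl0]; omega) (by rw [hr0]; omega)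
      (by rw [hl0]; push_cast; omega) (by rw [hr0]; push_cast; omega)
      (by intro j _ _ _; rw [hr0, hl0]; omega)
    rcases hFc : F with _ | ⟨a, t⟩
    · -- no space at all: A keeps (2n, -1), B's scan returns none
      have hnone : sttwScan cs n (n.toNat + 1) (PySem.Int.floordiv (n + 1) 2) (PySem.Int.floordiv n 2) = none := by
        apply hscan.1
        intro j hj0 hjn hsp
        have : j ∈ F := (hmemF j).mpr ⟨hj0, hjn, hsp⟩
        rw [hFc] at this; simp at this
      rw [hnone, hfold, hFc]
      rfl
    · -- at least one space: both return the chosen index M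
      have hpairF : F.Pairwise (· < ·) := List.Pairwise.filter _ (PySem.List.pairwise_lt_pyRange_one 0 n)
      have hpa : t.Pairwise (· < ·) := by rw [hFc] at hpairF; exact (List.pairwise_cons.mp hpairF).2
      have hat : ∀ x ∈ t, a < x := by rw [hFc] at hpairF; exact (List.pairwise_cons.mp hpairF).1
      obtain ⟨M, hfc, hMmem, hMbest⟩ := sttw_fold_char n t a hpa hat
      have haF : a ∈ F := by rw [hFc]; simp
      have ha := (hmemF a).mp haF
      have hstep : |2 * a - n| ≤ 2 * n := by
        simp only [Int.abs_eq_natAbs]; omega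
      have hAfold : F.foldl (fun (s : Int × Int) i => if |2 * i - n| ≤ s.1 then (|2 * i - n|, i) else s)
          ((2 * n : Int), (-1 : Int)) = (|2 * M - n|, M) := by
        rw [hFc, List.foldl_cons, if_pos hstep, hfc]
      have hMch : sttwChosen cs n M := by
        have hMF : M ∈ F := by rw [hFc]; exact hMmem
        refine ⟨(hmemF M).mp hMF, ?_⟩
        intro j hj0 hjn hjsp
        have hjF : j ∈ a :: t := by rw [← hFc]; exact (hmemF j).mpr ⟨hj0, hjn, hjsp⟩
        exact hMbest j hjF
      have hsome := hscan.2 M hMch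
      rw [hsome, hfold, hAfold]
  · rw [if_neg hgt, if_pos (by omega)]
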